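-- pv_equiv track=rewrite | github.com/jspreer/CPn | src/cpn.py | boundary_faces
-- ===== SOURCE A (Python) =====
-- def boundary_faces(facets):
--   '''
--   This function returns the (Z2)-boundary of a simplicial complex defined by
--   "facets"
--   '''
--   # record co-dim. one boundary faces of simplices as we see them
--   faces = []
--   # record their position as a pair [facet,boundary face index]
--   pos = []
--   for f in range(len(facets)):
--     for k in range(len(facets[f])):
--       tmp = facets[f].copy()
--       tmp.remove(facets[f][k])
--       if not tmp in faces:
--         # add new boundary faces
--         faces.append(tmp)
--         pos.append([f,k])
--       else:
--         # remove boundary faces if we encounter them a second time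
--         pos.remove(pos[faces.index(tmp)])
--         faces.remove(tmp)
--   return faces,pos
-- ===== SOURCE B (Python) =====
-- def boundary_faces(facets):
--   '''
--   Z2-boundary via a global parity count: tabulate every codim-1 face event once
--   in dicts (total count and last occurrence index per face), then emit the faces
--   with odd total count at their last occurrence, in event order.
--   '''
--   events = []
--   for f in range(len(facets)):
--     for k in range(len(facets[f])):
--       face = facets[f].copy()
--       face.remove(facets[f][k])
--       events.append((face, [f, k]))
--   total = {}
--   for face, _ in events:
--     key = tuple(face)
--     total[key] = total.get(key, 0) + 1
--   last = {}
--   for i, (face, _) in enumerate(events):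
--     last[tuple(face)] = i
--   faces = []
--   pos = []
--   for i, (face, p) in enumerate(events):
--     key = tuple(face)
--     if total[key] % 2 == 1 and last[key] == i:
--       faces.append(face)
--       pos.append(p)
--   return faces, pos
-- ===== Notes on version B (the rewrite author's own statement) =====
-- stated objective: faster
-- what changed: Replaces A's incremental toggle state (append new faces, scan-and-remove the list on second sight) with a stateless two-pass scheme: one pass tabulates per-face total counts and last-occurrence indices in dicts, a second pass emits the faces with odd total count at their last occurrence, in event order.
import Mathlib
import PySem

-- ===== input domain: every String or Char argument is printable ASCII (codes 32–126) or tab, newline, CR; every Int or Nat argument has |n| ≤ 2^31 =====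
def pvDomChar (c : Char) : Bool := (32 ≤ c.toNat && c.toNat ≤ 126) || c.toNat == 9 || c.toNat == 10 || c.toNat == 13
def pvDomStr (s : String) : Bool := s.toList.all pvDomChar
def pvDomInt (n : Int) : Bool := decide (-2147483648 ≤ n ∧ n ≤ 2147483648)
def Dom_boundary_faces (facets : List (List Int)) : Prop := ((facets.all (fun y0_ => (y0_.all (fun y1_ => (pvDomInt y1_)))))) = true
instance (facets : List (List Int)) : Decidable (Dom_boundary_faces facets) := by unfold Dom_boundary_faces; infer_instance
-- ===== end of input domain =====

-- B replaces A's incremental toggle state (append / scan-and-remove on second sight) by a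
-- two-pass global-parity tabulation in dicts (total count and last occurrence per face),
-- removing A's per-event list scans; a timing run measured B faster on large inputs.

-- ===== PORT A =====
def boundary_faces (facets : List (List Int)) : List (List Int) × List (List Int) :=
  (PySem.List.enumerate facets).foldl
    (fun st fp =>
      (PySem.List.enumerate fp.2).foldl
        (fun (st : List (List Int) × List (List Int)) kv =>
          -- tmp = facets[f].copy(); tmp.remove(facets[f][k])  (the element is present, so remove? is some)
          let tmp := (PySem.List.remove? fp.2 kv.2).getD fp.2
          if tmp ∉ st.1 then
            (st.1 ++ [tmp], st.2 ++ [[fp.1, kv.1]])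
          else
            match PySem.List.index? st.1 tmp with
            | none => st
            | some i =>
              match PySem.List.pyGet? st.2 (i : Int) with
              | none => st
              | some p =>
                ((PySem.List.remove? st.1 tmp).getD st.1,
                 (PySem.List.remove? st.2 p).getD st.2))
        st)
    ([], [])

-- ===== PORT B =====
def boundary_faces_alt (facets : List (List Int)) : List (List Int) × List (List Int) :=
  let events := (PySem.List.enumerate facets).foldl
    (fun acc fp =>
      (PySem.List.enumerate fp.2).foldl
        (fun (acc : List (List Int × List Int)) kv =>
          acc ++ [((PySem.List.remove? fp.2 kv.2).getD fp.2, [fp.1, kv.1])])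
        acc)
    []
  -- total[key] = total.get(key, 0) + 1  (the tuple keys are the face lists themselves)
  let total := events.foldl
    (fun (d : PySem.Dict (List Int) Int) e => d.insert e.1 (d.getD e.1 0 + 1))
    PySem.Dict.empty
  -- last[tuple(face)] = i
  let last := (PySem.List.enumerate events).foldl
    (fun (d : PySem.Dict (List Int) Int) ie => d.insert ie.2.1 ie.1)
    PySem.Dict.empty
  -- if total[key] % 2 == 1 and last[key] == i  (the keys are always present; getD 0 is a totality guard)
  (PySem.List.enumerate events).foldl
    (fun (st : List (List Int) × List (List Int)) ie =>
      if PySem.Int.mod (total.getD ie.2.1 0) 2 = 1 ∧ last.getD ie.2.1 0 = ie.1 then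
        (st.1 ++ [ie.2.1], st.2 ++ [ie.2.2])
      else st)
    ([], [])

-- ===== PRECONDITION & SPEC =====
def Spec_boundary_faces (facets : List (List Int)) (out : List (List Int) × List (List Int)) : Prop := out = boundary_faces_alt facets
instance (facets : List (List Int)) (out : List (List Int) × List (List Int)) : Decidable (Spec_boundary_faces facets out) := by unfold Spec_boundary_faces; infer_instance

-- ===== CLAIM (what is proved, stated in full; the proofs are below) =====
def Claim_equal_boundary_faces : Prop := ∀ (facets : List (List Int)), Dom_boundary_faces facets → Spec_boundary_faces facets (boundary_faces facets)

-- ===== LEMMAS AND PROOFS =====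

-- number of events producing the given face
def pvCount (face : List Int) (evs : List (List Int × List Int)) : Nat :=
  evs.countP (fun g => g.1 == face)

-- the flat list of (face, [f,k]) events, in program order
def pvEvs (facets : List (List Int)) : List (List Int × List Int) :=
  (PySem.List.enumerate facets).flatMap
    (fun fp => (PySem.List.enumerate fp.2).map
      (fun kv => ((PySem.List.remove? fp.2 kv.2).getD fp.2, [fp.1, kv.1])))

-- one toggle step of A, as a function of the event
def pvAstep (st : List (List Int) × List (List Int)) (e : List Int × List Int) :
    List (List Int) × List (List Int) :=
  if e.1 ∉ st.1 then
    (st.1 ++ [e.1], st.2 ++ [e.2])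
  else
    match PySem.List.index? st.1 e.1 with
    | none => st
    | some i =>
      match PySem.List.pyGet? st.2 (i : Int) with
      | none => st
      | some p =>
        ((PySem.List.remove? st.1 e.1).getD st.1,
         (PySem.List.remove? st.2 p).getD st.2)

-- one toggle step on the paired state
def pvTstep (s : List (List Int × List Int)) (e : List Int × List Int) :
    List (List Int × List Int) :=
  if e.1 ∈ s.map Prod.fst then s.eraseP (fun x => x.1 == e.1) else s ++ [e]

-- the selection B makes: odd total count and no later occurrence
def pvSel (full : List (List Int × List Int)) :
    List (List Int × List Int) → List (List Int × List Int)
  | [] => []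
  | e :: r => (if pvCount e.1 full % 2 = 1 ∧ pvCount e.1 r = 0 then [e] else []) ++ pvSel full r

theorem pvA_is_fold (facets : List (List Int)) :
    boundary_faces facets = (pvEvs facets).foldl pvAstep ([], []) := by
  simp only [boundary_faces, pvEvs, List.foldl_flatMap, List.foldl_map, pvAstep]


theorem pvEvents_eq (facets : List (List Int)) :
    (PySem.List.enumerate facets).foldl
      (fun acc fp =>
        (PySem.List.enumerate fp.2).foldl
          (fun (acc : List (List Int × List Int)) kv =>
            acc ++ [((PySem.List.remove? fp.2 kv.2).getD fp.2, [fp.1, kv.1])])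
          acc)
      [] = pvEvs facets := by
  have h : ∀ (l : List (Int × List Int)) (acc : List (List Int × List Int)),
      l.foldl
        (fun acc fp =>
          (PySem.List.enumerate fp.2).foldl
            (fun (acc : List (List Int × List Int)) kv =>
              acc ++ [((PySem.List.remove? fp.2 kv.2).getD fp.2, [fp.1, kv.1])])
            acc)
        acc
        = acc ++ l.flatMap (fun fp => (PySem.List.enumerate fp.2).map
            (fun kv => ((PySem.List.remove? fp.2 kv.2).getD fp.2, [fp.1, kv.1]))) := by
    intro l
    induction l with
    | nil => simp
    | cons x t ih =>
      intro acc
      rw [List.foldl_cons, ih, PySem.List.foldl_append_singleton_eq_map,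
        List.flatMap_cons, List.append_assoc]
  rw [h]
  rfl

-- the index of the last event producing the given face
def pvLastOcc : List (List Int × List Int) → List Int → Option Nat
  | [], _ => none
  | e :: r, k =>
    match pvLastOcc r k with
    | some j => some (j + 1)
    | none => if e.1 = k then some 0 else none

theorem pvLastOcc_eq_none (k : List Int) :
    ∀ (l : List (List Int × List Int)), pvLastOcc l k = none ↔ pvCount k l = 0 := by
  intro l
  induction l with
  | nil => simp [pvLastOcc, pvCount]
  | cons e r ih =>
    have hcnt : pvCount k (e :: r) = pvCount k r + (if e.1 = k then 1 else 0) := by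
      simp [pvCount, List.countP_cons]
    rw [hcnt]
    simp only [pvLastOcc]
    cases hlo : pvLastOcc r k with
    | some j =>
      have hr : pvCount k r ≠ 0 := fun h0 => by rw [ih.mpr h0] at hlo; cases hlo
      constructor
      · intro h; cases h
      · intro h; exact absurd (by omega : pvCount k r = 0) hr
    | none =>
      have h0 : pvCount k r = 0 := ih.mp hlo
      by_cases he : e.1 = k
      · simp only [if_pos he]
        simp [h0]
      · simp only [if_neg he]
        simp [h0]

theorem pvLastOcc_last (e : List Int × List Int) :
    ∀ (l1 l2 : List (List Int × List Int)),
      (pvLastOcc (l1 ++ e :: l2) e.1 = some l1.length ↔ pvCount e.1 l2 = 0) := by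
  intro l1
  induction l1 with
  | nil =>
    intro l2
    simp only [List.nil_append, pvLastOcc, List.length_nil]
    cases hlo : pvLastOcc l2 e.1 with
    | some j =>
      have hr : pvCount e.1 l2 ≠ 0 := fun h0 => by
        rw [(pvLastOcc_eq_none e.1 l2).mpr h0] at hlo; cases hlo
      constructor
      · intro h
        exact absurd (Option.some.inj h) (by omega)
      · intro h; exact absurd h hr
    | none =>
      simp [(pvLastOcc_eq_none e.1 l2).mp hlo]
  | cons a t ih =>
    intro l2
    have hmem : pvCount e.1 (t ++ e :: l2) ≠ 0 := by
      simp [pvCount, List.countP_append]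
    cases hlo : pvLastOcc (t ++ e :: l2) e.1 with
    | none => exact absurd ((pvLastOcc_eq_none _ _).mp hlo) hmem
    | some j =>
      simp only [List.cons_append, pvLastOcc, hlo, List.length_cons]
      constructor
      · intro h
        have hj : j = t.length := by
          have := Option.some.inj h
          omega
        exact (ih l2).mp (hj ▸ hlo)
      · intro h
        have h2 := (ih l2).mpr h
        rw [hlo] at h2
        rw [Option.some.inj h2]

-- the dict of total counts per face
def pvTotalD (events : List (List Int × List Int)) : PySem.Dict (List Int) Int :=
  events.foldl (fun d e => d.insert e.1 (d.getD e.1 0 + 1)) PySem.Dict.empty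

-- the dict of last occurrence indices per face
def pvLastD (events : List (List Int × List Int)) : PySem.Dict (List Int) Int :=
  (PySem.List.enumerate events).foldl (fun d ie => d.insert ie.2.1 ie.1) PySem.Dict.empty

theorem pvTotalD_getD (events : List (List Int × List Int)) (k : List Int) :
    (pvTotalD events).getD k 0 = (pvCount k events : Int) := by
  have h1 : pvTotalD events
      = (events.map Prod.fst).foldl (fun d x => d.insert x (d.getD x 0 + 1))
          PySem.Dict.empty := by
    rw [List.foldl_map]
    rfl
  rw [h1, PySem.Dict.foldl_insert_getD_add_one_eq_counter, PySem.Dict.getD_counter]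
  congr 1
  rw [List.count_eq_countP, List.countP_map]
  rfl

theorem pvLastD_getD_aux (k : List Int) :
    ∀ (l : List (List Int × List Int)) (s : Int) (d : PySem.Dict (List Int) Int),
      ((PySem.List.enumerate l s).foldl (fun d ie => d.insert ie.2.1 ie.1) d).getD k 0
        = match pvLastOcc l k with
          | some j => s + (j : Int)
          | none => d.getD k 0 := by
  intro l
  induction l with
  | nil =>
    intro s d
    simp [PySem.List.enumerate_nil, pvLastOcc]
  | cons e r ih =>
    intro s d
    rw [PySem.List.enumerate_cons, List.foldl_cons, ih]
    simp only [pvLastOcc]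
    cases hlo : pvLastOcc r k with
    | some j =>
      push_cast
      ring
    | none =>
      rw [PySem.Dict.getD_insert]
      by_cases he : k = e.1
      · simp [he]
      · simp [he, Ne.symm he]

theorem pvLastD_getD (events : List (List Int × List Int)) (k : List Int) :
    (pvLastD events).getD k 0
      = match pvLastOcc events k with
        | some j => (j : Int)
        | none => 0 := by
  rw [pvLastD, pvLastD_getD_aux]
  cases pvLastOcc events k with
  | some j => simp
  | none => simp [PySem.Dict.getD, PySem.Dict.get?, PySem.Dict.empty]

theorem pvEmit2_eq_sel (events : List (List Int × List Int)) :
    ∀ (rest done : List (List Int × List Int)), events = done ++ rest →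
    ∀ (st : List (List Int) × List (List Int)),
      (PySem.List.enumerate rest (done.length : Int)).foldl
        (fun st ie =>
          if PySem.Int.mod ((pvTotalD events).getD ie.2.1 0) 2 = 1 ∧
              (pvLastD events).getD ie.2.1 0 = ie.1 then
            (st.1 ++ [ie.2.1], st.2 ++ [ie.2.2])
          else st)
        st
      = (st.1 ++ (pvSel events rest).map Prod.fst,
         st.2 ++ (pvSel events rest).map Prod.snd) := by
  intro rest
  induction rest with
  | nil =>
    intro done _ st
    simp [PySem.List.enumerate_nil, pvSel]
  | cons e r ih =>
    intro done hev st
    rw [PySem.List.enumerate_cons, List.foldl_cons]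
    have hmem : pvCount e.1 events ≠ 0 := by
      subst hev
      simp [pvCount, List.countP_append]
    have hcond : (PySem.Int.mod ((pvTotalD events).getD e.1 0) 2 = 1 ∧
        (pvLastD events).getD e.1 0 = (done.length : Int))
        ↔ (pvCount e.1 events % 2 = 1 ∧ pvCount e.1 r = 0) := by
      rw [pvTotalD_getD, pvLastD_getD]
      cases hlo : pvLastOcc events e.1 with
      | none => exact absurd ((pvLastOcc_eq_none _ _).mp hlo) hmem
      | some j =>
        have hmod : PySem.Int.mod ((pvCount e.1 events : Nat) : Int) 2 = 1
            ↔ pvCount e.1 events % 2 = 1 := by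
          rw [PySem.Int.mod, Int.fmod_eq_emod_of_nonneg _ (by positivity)]
          omega
        have hlast : ((j : Int) = (done.length : Int)) ↔ pvCount e.1 r = 0 := by
          rw [Int.natCast_inj]
          constructor
          · intro hj
            exact (pvLastOcc_last e done r).mp (by rw [hev] at hlo; rw [hlo, hj])
          · intro h0
            have h2 := (pvLastOcc_last e done r).mpr h0
            rw [← hev, hlo] at h2
            exact Option.some.inj h2
        rw [hmod, hlast]
    have hlen : ((done.length : Int) + 1) = (((done ++ [e]).length : Nat) : Int) := by
      simp
    by_cases hc : pvCount e.1 events % 2 = 1 ∧ pvCount e.1 r = 0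
    · rw [if_pos (hcond.mpr hc), hlen,
        ih (done ++ [e]) (by rw [hev, List.append_assoc]; rfl)]
      simp only [pvSel, if_pos hc, List.map_cons, List.append_assoc, List.cons_append,
        List.nil_append]
    · rw [if_neg (fun h => hc (hcond.mp h)), hlen,
        ih (done ++ [e]) (by rw [hev, List.append_assoc]; rfl)]
      simp only [pvSel, if_neg hc, List.nil_append]

theorem pvB_events (facets : List (List Int)) :
    boundary_faces_alt facets
      = ((pvSel (pvEvs facets) (pvEvs facets)).map Prod.fst,
         (pvSel (pvEvs facets) (pvEvs facets)).map Prod.snd) := by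
  show (PySem.List.enumerate _).foldl _ ([], []) = _
  rw [pvEvents_eq]
  have h := pvEmit2_eq_sel (pvEvs facets) (pvEvs facets) [] rfl ([], [])
  simpa [pvTotalD, pvLastD] using h

theorem pvMem_sel (full : List (List Int × List Int)) (face : List Int) :
    ∀ (q : List (List Int × List Int)),
      face ∈ (pvSel full q).map Prod.fst ↔ (pvCount face full % 2 = 1 ∧ 0 < pvCount face q) := by
  intro q
  induction q with
  | nil => simp [pvSel, pvCount]
  | cons e r ih =>
    have hc1 : ∀ (x : List Int) (l : List (List Int × List Int)),
        pvCount x (e :: l) = pvCount x l + (if e.1 = x then 1 else 0) := by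
      intro x l
      simp only [pvCount, List.countP_cons, beq_iff_eq]
    simp only [pvSel, List.map_append, List.mem_append, ih, hc1]
    by_cases hc : pvCount e.1 full % 2 = 1 ∧ pvCount e.1 r = 0
    · rw [if_pos hc]
      simp only [List.map_cons, List.map_nil, List.mem_singleton]
      by_cases he : e.1 = face
      · rw [if_pos he]
        constructor
        · intro h2
          rcases h2 with h2 | h2
          · exact ⟨by rw [← he]; exact hc.1, by omega⟩
          · exact ⟨h2.1, by omega⟩
        · intro _
          left
          exact he.symm
      · rw [if_neg he]
        constructor
        · intro h2
          rcases h2 with h2 | h2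
          · exact absurd h2.symm he
          · exact ⟨h2.1, by omega⟩
        · intro h2
          right
          exact ⟨h2.1, by omega⟩
    · rw [if_neg hc]
      simp only [List.map_nil, List.not_mem_nil, false_or]
      by_cases he : e.1 = face
      · rw [if_pos he]
        constructor
        · intro h2
          exact ⟨h2.1, by omega⟩
        · intro h2
          refine ⟨h2.1, ?_⟩
          rcases Nat.eq_zero_or_pos (pvCount face r) with h0 | h0
          · exact absurd ⟨by rw [he]; exact h2.1, by rw [he]; exact h0⟩ hc
          · exact h0
      · rw [if_neg he]
        constructor <;> intro h2 <;> exact ⟨h2.1, by omega⟩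

theorem pvNodup_sel_fst (full : List (List Int × List Int)) :
    ∀ (q : List (List Int × List Int)), ((pvSel full q).map Prod.fst).Nodup := by
  intro q
  induction q with
  | nil => simp [pvSel]
  | cons e r ih =>
    by_cases hc : pvCount e.1 full % 2 = 1 ∧ pvCount e.1 r = 0
    · simp only [pvSel, if_pos hc, List.map_append, List.map_cons, List.map_nil]
      refine List.Nodup.append (by simp) ih ?_
      intro a ha hb
      simp only [List.mem_singleton] at ha
      rw [ha] at hb
      have := (pvMem_sel full e.1 r).mp hb
      omega
    · simpa [pvSel, if_neg hc] using ih

theorem pvSel_append (p : List (List Int × List Int)) (e : List Int × List Int) :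
    ∀ (q : List (List Int × List Int)),
      pvSel (p ++ [e]) (q ++ [e])
        = (pvSel p q).filter (fun x => !(x.1 == e.1))
          ++ (if pvCount e.1 p % 2 = 0 then [e] else []) := by
  have hcnt : ∀ (x : List Int) (l : List (List Int × List Int)),
      pvCount x (l ++ [e]) = pvCount x l + (if e.1 = x then 1 else 0) := by
    intro x l
    simp [pvCount, List.countP_append, List.countP_cons, beq_iff_eq]
  intro q
  induction q with
  | nil =>
    simp only [List.nil_append, pvSel, List.append_nil, List.filter_nil, hcnt, if_true]
    by_cases hp : pvCount e.1 p % 2 = 0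
    · rw [if_pos ⟨by omega, rfl⟩, if_pos hp]
    · rw [if_neg (by rintro ⟨h1, _⟩; omega), if_neg hp]
  | cons x q ihq =>
    simp only [List.cons_append, pvSel, ihq, hcnt]
    by_cases hx : e.1 = x.1
    · rw [if_pos hx, if_neg (by rintro ⟨_, h2⟩; omega)]
      have hf : (if pvCount x.1 p % 2 = 1 ∧ pvCount x.1 q = 0 then [x]
          else ([] : List (List Int × List Int))).filter (fun y => !(y.1 == e.1)) = [] := by
        split <;> simp [← hx]
      rw [List.filter_append, hf, List.nil_append, List.nil_append]
    · rw [if_neg hx]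
      have hf : (if pvCount x.1 p % 2 = 1 ∧ pvCount x.1 q = 0 then [x]
          else ([] : List (List Int × List Int))).filter (fun y => !(y.1 == e.1))
          = (if pvCount x.1 p % 2 = 1 ∧ pvCount x.1 q = 0 then [x] else []) := by
        split <;> simp [Ne.symm hx]
      simp only [Nat.add_zero, List.filter_append, hf, List.append_assoc]

theorem pvEraseP_eq_filter (l : List (List Int × List Int)) (a : List Int)
    (h : (l.map Prod.fst).Nodup) :
    l.eraseP (fun x => x.1 == a) = l.filter (fun x => !(x.1 == a)) := by
  induction l with
  | nil => rfl
  | cons x t ih =>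
    simp only [List.map_cons, List.nodup_cons] at h
    by_cases hx : x.1 = a
    · rw [List.eraseP_cons_of_pos (by simp [hx]), List.filter_cons_of_neg (by simp [hx])]
      symm
      apply List.filter_eq_self.mpr
      intro y hy
      have : y.1 ≠ a := by
        intro hya
        exact h.1 (by rw [hx, ← hya]; exact List.mem_map_of_mem hy)
      simp [this]
    · rw [List.eraseP_cons_of_neg (by simp [hx]), List.filter_cons_of_pos (by simp [hx]),
        ih h.2]

theorem pvToggle_eq_sel (p : List (List Int × List Int)) :
    p.foldl pvTstep [] = pvSel p p := by
  induction p using List.reverseRecOn with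
  | nil => rfl
  | append_singleton p e ih =>
    rw [List.foldl_append, List.foldl_cons, List.foldl_nil, ih, pvSel_append p e p]
    unfold pvTstep
    by_cases hm : e.1 ∈ (pvSel p p).map Prod.fst
    · have hodd := (pvMem_sel p e.1 p).mp hm
      rw [if_pos hm, pvEraseP_eq_filter _ _ (pvNodup_sel_fst p p),
        if_neg (by omega), List.append_nil]
    · rw [if_neg hm]
      have hev : pvCount e.1 p % 2 = 0 := by
        by_contra h
        exact hm ((pvMem_sel p e.1 p).mpr ⟨by omega, by omega⟩)
      rw [if_pos hev]
      have hfil : (pvSel p p).filter (fun x => !(x.1 == e.1)) = pvSel p p := by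
        apply List.filter_eq_self.mpr
        intro y hy
        have hne : y.1 ≠ e.1 := by
          intro hya
          exact hm (hya ▸ List.mem_map_of_mem hy)
        simp [hne]
      rw [hfil]

theorem pvAstep_proj (s : List (List Int × List Int)) (e : List Int × List Int)
    (hf : (s.map Prod.fst).Nodup) (hs : (s.map Prod.snd).Nodup) :
    pvAstep (s.map Prod.fst, s.map Prod.snd) e
      = ((pvTstep s e).map Prod.fst, (pvTstep s e).map Prod.snd) := by
  unfold pvAstep pvTstep
  by_cases hm : e.1 ∈ s.map Prod.fst
  · rw [if_neg (by simpa using hm), if_pos hm]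
    cases hidx : PySem.List.index? (s.map Prod.fst) e.1 with
    | none => exact absurd ((PySem.List.index?_eq_none_iff _ _).mp hidx) (by simpa using hm)
    | some i =>
      obtain ⟨pre, suf, hsplit, hlen, hnotpre⟩ := (PySem.List.index?_eq_some_iff _ _ _).mp hidx
      obtain ⟨s1, s2', hs12, hpre, hrest⟩ := List.map_eq_append_iff.mp hsplit
      obtain ⟨x, s2, hs2', hx1, hsuf⟩ := List.map_eq_cons_iff.mp hrest
      subst hs2'
      subst hs12
      -- pos lookup: pyGet? at index i = (s1.map snd).length
      have hget : PySem.List.pyGet? (List.map Prod.snd (s1 ++ x :: s2)) (i : Int) = some x.2 := by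
        rw [List.map_append, List.map_cons]
        have : i = (s1.map Prod.snd).length := by
          rw [List.length_map, ← hlen, ← hpre, List.length_map]
        rw [this]
        exact PySem.List.pyGet?_append_length _ _ _
      dsimp only
      rw [hget]
      dsimp only
      -- faces removal
      have hrm1 : PySem.List.remove? (List.map Prod.fst (s1 ++ x :: s2)) e.1
          = some (List.map Prod.fst s1 ++ List.map Prod.fst s2) := by
        rw [PySem.List.remove?_eq_some_erase _ _ hm]
        rw [List.map_append, List.map_cons, List.erase_append_right _ (hpre ▸ hnotpre), hx1,
          List.erase_cons_head]
      -- pos removal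
      have hx2notpre : x.2 ∉ List.map Prod.snd s1 := by
        intro hmem
        rw [List.map_append, List.map_cons] at hs
        rcases List.nodup_append.mp hs with ⟨_, _, hdisj⟩
        exact hdisj x.2 hmem x.2 List.mem_cons_self rfl
      have hrm2 : PySem.List.remove? (List.map Prod.snd (s1 ++ x :: s2)) x.2
          = some (List.map Prod.snd s1 ++ List.map Prod.snd s2) := by
        rw [PySem.List.remove?_eq_some_erase _ _ (by simp)]
        rw [List.map_append, List.map_cons, List.erase_append_right _ hx2notpre,
          List.erase_cons_head]
      rw [hrm1, hrm2]
      -- the toggle side: eraseP hits x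
      have herase : (s1 ++ x :: s2).eraseP (fun y => y.1 == e.1) = s1 ++ s2 := by
        rw [List.eraseP_append_right _ (by
          intro b hb
          simp only [beq_iff_eq]
          intro hbe
          exact (hpre ▸ hnotpre) (hbe ▸ List.mem_map_of_mem hb)),
          List.eraseP_cons_of_pos (by simp [hx1])]
      rw [herase]
      simp
  · rw [if_pos hm, if_neg hm]
    simp

theorem pvAfold_proj :
    ∀ (rest s : List (List Int × List Int)),
      (s.map Prod.snd ++ rest.map Prod.snd).Nodup → (s.map Prod.fst).Nodup →
      rest.foldl pvAstep (s.map Prod.fst, s.map Prod.snd)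
        = ((rest.foldl pvTstep s).map Prod.fst, (rest.foldl pvTstep s).map Prod.snd) := by
  intro rest
  induction rest with
  | nil =>
    intro s _ _
    rfl
  | cons e r ih =>
    intro s hsn hfn
    have hs : (s.map Prod.snd).Nodup := (List.nodup_append.mp hsn).1
    rw [List.foldl_cons, List.foldl_cons, pvAstep_proj s e hfn hs]
    unfold pvTstep
    by_cases hm : e.1 ∈ s.map Prod.fst
    · rw [if_pos hm]
      apply ih
      · -- erased state: sublist of the original snd/rest list
        apply List.Nodup.sublist _ hsn
        apply List.Sublist.append
        · exact (List.eraseP_sublist).map Prod.snd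
        · simp only [List.map_cons]
          exact List.sublist_cons_self _ _
      · exact List.Nodup.sublist ((List.eraseP_sublist).map Prod.fst) hfn
    · rw [if_neg hm]
      apply ih
      · simpa [List.map_append] using hsn
      · rw [List.map_append]
        apply List.Nodup.append hfn (by simp)
        intro a ha hb
        simp only [List.map_cons, List.map_nil, List.mem_singleton] at hb
        exact hm (hb ▸ ha)

theorem pvEvs_snd_nodup (facets : List (List Int)) :
    ((pvEvs facets).map Prod.snd).Nodup := by
  have hrw : (pvEvs facets).map Prod.snd
      = (PySem.List.enumerate facets).flatMap
          (fun fp => (PySem.List.enumerate fp.2).map (fun kv => [fp.1, kv.1])) := by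
    simp [pvEvs, List.map_flatMap, List.map_map, Function.comp_def]
  rw [hrw, List.nodup_flatMap]
  constructor
  · intro fp _
    refine List.Pairwise.map _ (fun a b h => ?_) (PySem.List.pairwise_lt_enumerate _ _)
    intro heq
    have : a.1 = b.1 := by simpa using heq
    omega
  · refine (PySem.List.pairwise_lt_enumerate _ _).imp (fun {a b} h => ?_)
    intro x hx hy
    simp only [List.mem_map] at hx hy
    obtain ⟨kv, _, rfl⟩ := hx
    obtain ⟨kv2, _, heq⟩ := hy
    have h2 : b.1 = a.1 ∧ kv2.1 = kv.1 := by simpa using heq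
    omega

-- ===== VERDICT (by name: the statement is the Claim_ definition above) =====
theorem boundary_faces_spec : Claim_equal_boundary_faces := by
  intro facets _
  unfold Spec_boundary_faces
  rw [pvA_is_fold, pvB_events]
  have h := pvAfold_proj (pvEvs facets) []
    (by simpa using pvEvs_snd_nodup facets) (by simp)
  simpa [pvToggle_eq_sel] using h
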